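-- pv_equiv track=rewrite | github.com/ckoons/BubbleSpacetimeTheory | play/toy_1402_pnp_geometric_curvature.py | hessian_diagonal
-- ===== SOURCE A (Python) =====
-- def eval_sat(clauses, assignment):
--     """Count satisfied clauses."""
--     count = 0
--     for clause in clauses:
--         sat = False
--         for var, sign in clause:
--             val = assignment[var]
--             if (sign > 0 and val) or (sign < 0 and not val):
--                 sat = True
--                 break
--         if sat:
--             count += 1
--     return count
--
-- def energy(clauses, assignment):
--     """Energy = number of VIOLATED clauses."""
--     return len(clauses) - eval_sat(clauses, assignment)
--
-- def hessian_diagonal(clauses, n, assignment):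
--     """Diagonal of Hessian of energy at assignment.
--     H_ii = change in energy when flipping variable i."""
--     base_E = energy(clauses, assignment)
--     diag = []
--     for i in range(n):
--         flipped = list(assignment)
--         flipped[i] = not flipped[i]
--         diag.append(energy(clauses, flipped) - base_E)
--     return diag
-- ===== SOURCE B (Python) =====
-- def hessian_diagonal(clauses, n, assignment):
--     """H_ii = change in the number of violated clauses when cell i is flipped.
--     One pass over the clauses: each clause is evaluated once, then re-evaluated only
--     under flips of the cells it actually reads, accumulating per-cell deltas.
--     (Each flip is done by toggling the cell and restoring it right after.)"""
--     def sat(clause):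
--         return any((sign > 0 and assignment[var]) or (sign < 0 and not assignment[var])
--                    for var, sign in clause)
--
--     delta = [0] * len(assignment)
--     for clause in clauses:
--         before = sat(clause)
--         for var in dict.fromkeys(v for v, _ in clause):
--             assignment[var] = not assignment[var]
--             delta[var] += before - sat(clause)
--             assignment[var] = not assignment[var]
--     return [delta[i] for i in range(n)]
-- ===== Notes on version B (the rewrite author's own statement) =====
-- stated objective: faster
-- what changed: Instead of recomputing the energy of all m clauses for each of the n flips (O(n*m*k)), B evaluates each clause once and accumulates its satisfaction change only into the per-cell delta entries of the cells it reads, returning the first n (O(len + n + m*k^2)); Pre_ excludes inputs where A raises (n > len(assignment), or an out-of-range variable index that short-circuit evaluation may or may not reach) and clauses naming one assignment cell under two different indices (v and v-len), a duplicate-key corner where A's single count and B's per-index count are both accidental.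
-- outside the precondition, e.g. on hessian_diagonal([[(0, 1), (-2, 1)]], 2, [True, True]): A returns [1, 0], B returns [2, 0]; on hessian_diagonal([[(0, 1), (5, 1)]], 0, [True, True]): A returns [], B raises IndexError
import Mathlib
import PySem

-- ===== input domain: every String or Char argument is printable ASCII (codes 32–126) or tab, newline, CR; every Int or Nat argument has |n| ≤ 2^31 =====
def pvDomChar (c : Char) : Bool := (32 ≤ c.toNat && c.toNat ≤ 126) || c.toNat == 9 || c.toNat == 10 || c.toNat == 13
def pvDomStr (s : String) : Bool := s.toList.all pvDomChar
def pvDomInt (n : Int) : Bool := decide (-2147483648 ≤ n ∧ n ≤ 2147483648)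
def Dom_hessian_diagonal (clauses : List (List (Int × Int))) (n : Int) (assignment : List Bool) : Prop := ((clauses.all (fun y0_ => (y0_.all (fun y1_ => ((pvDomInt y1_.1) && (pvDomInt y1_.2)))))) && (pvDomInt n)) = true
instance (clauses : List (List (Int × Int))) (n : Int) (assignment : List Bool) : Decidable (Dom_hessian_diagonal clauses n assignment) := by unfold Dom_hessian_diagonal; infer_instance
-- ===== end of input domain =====

-- B evaluates each clause once and accumulates its satisfaction change only into the per-cell
-- deltas of the cells the clause reads, instead of recomputing the energy of every clause for
-- every flip (faster); return value only: B toggles assignment cells and restores them in place.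

-- ===== PORT A =====
def pvEvalSat (clauses : List (List (Int × Int))) (assignment : List Bool) : Int :=
  clauses.foldl (fun count clause =>
    let sat := clause.any (fun l =>
      let val := PySem.List.pyGetD assignment l.1 false
      (decide (l.2 > 0) && val) || (decide (l.2 < 0) && !val))
    if sat then count + 1 else count) 0

def pvEnergyA (clauses : List (List (Int × Int))) (assignment : List Bool) : Int :=
  (clauses.length : Int) - pvEvalSat clauses assignment

def hessian_diagonal (clauses : List (List (Int × Int))) (n : Int) (assignment : List Bool) : List Int :=
  let baseE := pvEnergyA clauses assignment
  (PySem.List.pyRange 0 n 1).foldl (fun diag i =>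
    let flipped := PySem.List.pySetD assignment i (!(PySem.List.pyGetD assignment i false))
    diag ++ [pvEnergyA clauses flipped - baseE]) []

-- ===== PORT B =====
def pvSatB (clause : List (Int × Int)) (assignment : List Bool) : Bool :=
  clause.any (fun l =>
    let val := PySem.List.pyGetD assignment l.1 false
    (decide (l.2 > 0) && val) || (decide (l.2 < 0) && !val))

def pvB2i (b : Bool) : Int := if b then 1 else 0

def hessian_diagonal_alt (clauses : List (List (Int × Int))) (n : Int) (assignment : List Bool) : List Int :=
  let delta :=
    clauses.foldl (fun delta clause =>
      let before := pvSatB clause assignment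
      (PySem.List.dedup (clause.map (fun l => l.1))).foldl (fun d v =>
        -- Source B toggles assignment[v], re-evaluates the clause, toggles back:
        -- modeled by evaluating the clause on the toggled copy
        PySem.List.pySetD d v
          (PySem.List.pyGetD d v 0 +
            (pvB2i before - pvB2i (pvSatB clause
              (PySem.List.pySetD assignment v (!(PySem.List.pyGetD assignment v false))))))) delta)
      (List.replicate assignment.length 0)
  (PySem.List.pyRange 0 n 1).map (fun i => PySem.List.pyGetD delta i 0)

-- ===== PRECONDITION & SPEC =====
-- Pre_ excludes (a) inputs on which A raises IndexError: n > len(assignment), or a variable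
-- index outside [-len, len) — whether such an index is ever evaluated depends on short-circuit
-- clause evaluation, which a closed-form condition cannot express; and (b) clauses that name one
-- assignment cell under two different indices (v and v-len), a duplicate-key corner: A counts
-- such a clause once per flip while B accumulates once per distinct index, both accidental.
def Pre_hessian_diagonal (clauses : List (List (Int × Int))) (n : Int) (assignment : List Bool) : Prop :=
  n ≤ (assignment.length : Int) ∧
  (∀ c ∈ clauses, ∀ l ∈ c, -(assignment.length : Int) ≤ l.1 ∧ l.1 < (assignment.length : Int)) ∧
  (∀ c ∈ clauses, ∀ l1 ∈ c, ∀ l2 ∈ c,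
    l1.1 = l2.1 ∨ (l1.1 - l2.1 ≠ (assignment.length : Int) ∧ l2.1 - l1.1 ≠ (assignment.length : Int)))
instance (clauses : List (List (Int × Int))) (n : Int) (assignment : List Bool) : Decidable (Pre_hessian_diagonal clauses n assignment) := by unfold Pre_hessian_diagonal; infer_instance

def pvWitness_hessian_diagonal : (List (List (Int × Int))) × Int × List Bool :=
  ([[(0, 1), (-1, -1)], [(1, 1)]], 2, [true, false])

def Spec_hessian_diagonal (clauses : List (List (Int × Int))) (n : Int) (assignment : List Bool) (out : List Int) : Prop := out = hessian_diagonal_alt clauses n assignment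
instance (clauses : List (List (Int × Int))) (n : Int) (assignment : List Bool) (out : List Int) : Decidable (Spec_hessian_diagonal clauses n assignment out) := by unfold Spec_hessian_diagonal; infer_instance

-- ===== CLAIM (what is proved, stated in full; the proofs are below) =====
def Claim_equal_hessian_diagonal : Prop := ∀ (clauses : List (List (Int × Int))) (n : Int) (assignment : List Bool), Dom_hessian_diagonal clauses n assignment → Pre_hessian_diagonal clauses n assignment → Spec_hessian_diagonal clauses n assignment (hessian_diagonal clauses n assignment)

-- ===== LEMMAS AND PROOFS =====

-- the assignment cell a (possibly negative, in-range) Python index refers to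
def pvCell (L : Nat) (v : Int) : Nat := if 0 ≤ v then v.toNat else L - (-v).toNat

lemma pvCell_lt (L : Nat) (v : Int) (h1 : -(L : Int) ≤ v) (h2 : v < (L : Int)) :
    pvCell L v < L := by
  unfold pvCell; split_ifs <;> omega

lemma pySetD_cell {α : Type} (a : List α) (v : Int) (w : α)
    (h1 : -(a.length : Int) ≤ v) (h2 : v < (a.length : Int)) :
    PySem.List.pySetD a v w = a.set (pvCell a.length v) w := by
  by_cases h0 : 0 ≤ v
  · rw [PySem.List.pySetD_of_nonneg a w h0, pvCell, if_pos h0]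
  · simp only [PySem.List.pySetD, PySem.List.pySet?, PySem.List.pyIdx?, pvCell]
    split_ifs <;> rfl

lemma pyGetD_cell {α : Type} (a : List α) (v : Int) (d : α)
    (h1 : -(a.length : Int) ≤ v) (h2 : v < (a.length : Int)) :
    PySem.List.pyGetD a v d = a.getD (pvCell a.length v) d := by
  by_cases h0 : 0 ≤ v
  · rw [PySem.List.pyGetD_of_nonneg a d h0, pvCell, if_pos h0]
  · simp only [PySem.List.pyGetD, PySem.List.pyGet?, PySem.List.pyIdx?, pvCell]
    split_ifs <;> simp [List.getD_eq_getElem?_getD]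

lemma getD_set_nat {α : Type} (a : List α) (c m : Nat) (w d : α) (hc : c < a.length) :
    (a.set c w).getD m d = if m = c then w else a.getD m d := by
  by_cases h : m = c
  · rw [if_pos h, h, List.getD_eq_getElem _ _ (by rw [List.length_set]; exact hc),
      List.getElem_set_self]
  · rw [if_neg h, List.getD_eq_getElem?_getD, List.getElem?_set_ne (fun hh => h hh.symm),
      ← List.getD_eq_getElem?_getD]

-- a clause reading none of cell k is unaffected by flipping cell k
lemma pvSatB_set_untouched (clause : List (Int × Int)) (a : List Bool) (k : Nat) (w : Bool)
    (hk : k < a.length)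
    (hv : ∀ l ∈ clause, -(a.length : Int) ≤ l.1 ∧ l.1 < (a.length : Int))
    (hne : ∀ l ∈ clause, pvCell a.length l.1 ≠ k) :
    pvSatB clause (a.set k w) = pvSatB clause a := by
  induction clause with
  | nil => rfl
  | cons l c ih =>
    have hl := hv l (by simp)
    have hread : PySem.List.pyGetD (a.set k w) l.1 false = PySem.List.pyGetD a l.1 false := by
      rw [pyGetD_cell (a.set k w) l.1 false (by simpa using hl.1) (by simpa using hl.2),
          pyGetD_cell a l.1 false hl.1 hl.2]
      have : pvCell (a.set k w).length l.1 = pvCell a.length l.1 := by rw [List.length_set]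
      rw [this, getD_set_nat a _ _ _ _ hk, if_neg (hne l (by simp))]
    simp only [pvSatB, List.any_cons] at *
    rw [hread, ih (fun x hx => hv x (by simp [hx])) (fun x hx => hne x (by simp [hx]))]

-- the delta a clause adds to cell c of the accumulator
def pvFF (clause : List (Int × Int)) (a : List Bool) (c : Nat) : Int :=
  pvB2i (pvSatB clause a) - pvB2i (pvSatB clause (a.set c (!(a.getD c false))))

-- B's inner fold over the clause's deduplicated variable indices, rewritten over cells
lemma pvFold_cells (clause : List (Int × Int)) (a : List Bool) :
    ∀ (js : List Int), (∀ v ∈ js, -(a.length : Int) ≤ v ∧ v < (a.length : Int)) →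
      ∀ d : List Int, d.length = a.length →
      js.foldl (fun d v =>
        PySem.List.pySetD d v
          (PySem.List.pyGetD d v 0 +
            (pvB2i (pvSatB clause a) - pvB2i (pvSatB clause
              (PySem.List.pySetD a v (!(PySem.List.pyGetD a v false))))))) d
      = (js.map (pvCell a.length)).foldl
          (fun d c => d.set c (d.getD c 0 + pvFF clause a c)) d := by
  intro js
  induction js with
  | nil => intro _ d _; rfl
  | cons v js ih =>
    intro hv d hd
    have h1 := (hv v (by simp)).1
    have h2 := (hv v (by simp)).2
    have h1d : -(d.length : Int) ≤ v := by rw [hd]; exact h1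
    have h2d : v < (d.length : Int) := by rw [hd]; exact h2
    simp only [List.foldl_cons, List.map_cons]
    rw [pySetD_cell d v _ h1d h2d, pyGetD_cell d v _ h1d h2d,
        pySetD_cell a v _ h1 h2, pyGetD_cell a v _ h1 h2, hd]
    rw [ih (fun x hx => hv x (by simp [hx])) _ (by rw [List.length_set]; exact hd)]
    rfl

lemma pvNatFold_length (F : Nat → Int) :
    ∀ (cells : List Nat) (d : List Int),
      (cells.foldl (fun d c => d.set c (d.getD c 0 + F c)) d).length = d.length := by
  intro cells
  induction cells with
  | nil => intro d; rfl
  | cons c cells ih => intro d; simp only [List.foldl_cons]; rw [ih, List.length_set]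

lemma pvNatFold_getD (F : Nat → Int) (k : Nat) :
    ∀ (cells : List Nat), cells.Nodup →
      ∀ d : List Int, (∀ c ∈ cells, c < d.length) →
      (cells.foldl (fun d c => d.set c (d.getD c 0 + F c)) d).getD k 0
        = d.getD k 0 + (if k ∈ cells then F k else 0) := by
  intro cells
  induction cells with
  | nil => intro _ d _; simp
  | cons c cells ih =>
    intro hnd d hlt
    have hc := hlt c (by simp)
    have hnd' := List.nodup_cons.mp hnd
    simp only [List.foldl_cons]
    rw [ih hnd'.2 _ (fun x hx => by rw [List.length_set]; exact hlt x (by simp [hx]))]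
    by_cases hkc : k = c
    · have hknotin : k ∉ cells := by rw [hkc]; exact hnd'.1
      rw [if_neg hknotin, if_pos (by simp [hkc]), getD_set_nat d c k _ 0 hc, if_pos hkc, hkc]
      ring
    · rw [getD_set_nat d c k _ 0 hc, if_neg hkc]
      have hmem : (k ∈ c :: cells) ↔ (k ∈ cells) := by simp [List.mem_cons, hkc]
      rw [if_congr hmem rfl rfl]

-- the whole accumulation: length invariant and per-cell value
lemma pvDelta_getD (clauses : List (List (Int × Int))) (a : List Bool) (k : Nat)
    (hvars : ∀ c ∈ clauses, ∀ l ∈ c, -(a.length : Int) ≤ l.1 ∧ l.1 < (a.length : Int))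
    (halias : ∀ c ∈ clauses, ∀ l1 ∈ c, ∀ l2 ∈ c,
      l1.1 = l2.1 ∨ (l1.1 - l2.1 ≠ (a.length : Int) ∧ l2.1 - l1.1 ≠ (a.length : Int))) :
    ∀ d : List Int, d.length = a.length →
      (clauses.foldl (fun delta clause =>
        (PySem.List.dedup (clause.map (fun l => l.1))).foldl (fun d v =>
          PySem.List.pySetD d v
            (PySem.List.pyGetD d v 0 +
              (pvB2i (pvSatB clause a) - pvB2i (pvSatB clause
                (PySem.List.pySetD a v (!(PySem.List.pyGetD a v false))))))) delta) d).length
          = a.length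
      ∧
      (clauses.foldl (fun delta clause =>
        (PySem.List.dedup (clause.map (fun l => l.1))).foldl (fun d v =>
          PySem.List.pySetD d v
            (PySem.List.pyGetD d v 0 +
              (pvB2i (pvSatB clause a) - pvB2i (pvSatB clause
                (PySem.List.pySetD a v (!(PySem.List.pyGetD a v false))))))) delta) d).getD k 0
        = d.getD k 0 + (clauses.map (fun c =>
            if k ∈ (PySem.List.dedup (c.map (fun l => l.1))).map (pvCell a.length) then
              pvFF c a k else 0)).sum := by
  induction clauses with
  | nil => intro d hd; exact ⟨hd, by simp⟩
  | cons c cs ih =>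
    intro d hd
    have hvc := hvars c (by simp)
    have hjs : ∀ v ∈ PySem.List.dedup (c.map (fun l => l.1)),
        -(a.length : Int) ≤ v ∧ v < (a.length : Int) := by
      intro v hvm
      rw [PySem.List.mem_dedup] at hvm
      obtain ⟨l, hl, rfl⟩ := List.mem_map.mp hvm
      exact hvc l hl
    simp only [List.foldl_cons, List.map_cons, List.sum_cons]
    rw [pvFold_cells c a _ hjs d hd]
    have hd' : (((PySem.List.dedup (c.map (fun l => l.1))).map (pvCell a.length)).foldl
        (fun d c' => d.set c' (d.getD c' 0 + pvFF c a c')) d).length = a.length := by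
      rw [pvNatFold_length]; exact hd
    obtain ⟨hlen, hval⟩ := ih (fun x hx => hvars x (by simp [hx]))
      (fun x hx => halias x (by simp [hx])) _ hd'
    refine ⟨hlen, ?_⟩
    rw [hval]
    have hinj : ∀ v1 ∈ PySem.List.dedup (c.map (fun l => l.1)),
        ∀ v2 ∈ PySem.List.dedup (c.map (fun l => l.1)),
        pvCell a.length v1 = pvCell a.length v2 → v1 = v2 := by
      intro v1 hm1 v2 hm2 he
      rw [PySem.List.mem_dedup] at hm1 hm2
      obtain ⟨l1, hl1, rfl⟩ := List.mem_map.mp hm1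
      obtain ⟨l2, hl2, rfl⟩ := List.mem_map.mp hm2
      have hb1 := hvc l1 hl1
      have hb2 := hvc l2 hl2
      have hal := halias c (by simp) l1 hl1 l2 hl2
      unfold pvCell at he
      split_ifs at he <;> omega
    have hnd : ((PySem.List.dedup (c.map (fun l => l.1))).map (pvCell a.length)).Nodup :=
      List.Nodup.map_on hinj (PySem.List.nodup_dedup _)
    have hbnd : ∀ c' ∈ (PySem.List.dedup (c.map (fun l => l.1))).map (pvCell a.length),
        c' < d.length := by
      intro c' hc'
      obtain ⟨v, hvm, rfl⟩ := List.mem_map.mp hc'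
      have := hjs v hvm
      rw [hd]
      exact pvCell_lt a.length v this.1 this.2
    rw [pvNatFold_getD (pvFF c a) k _ hnd d hbnd]
    ring

lemma pvEvalSat_eq_sum (cs : List (List (Int × Int))) (x : List Bool) :
    pvEvalSat cs x = (cs.map (fun c => pvB2i (pvSatB c x))).sum := by
  show cs.foldl (fun count c => if pvSatB c x = true then count + 1 else count) 0
      = (cs.map (fun c => if pvSatB c x = true then (1 : Int) else 0)).sum
  rw [PySem.List.foldl_count_if, PySem.List.sum_map_ite_one_zero, zero_add]

lemma pvSum_map_sub {α : Type} (f g : α → Int) (l : List α) :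
    (l.map (fun x => f x - g x)).sum = (l.map f).sum - (l.map g).sum := by
  induction l with
  | nil => simp
  | cons x xs ih => simp [ih]; ring

-- ===== VERDICT (by name: the statement is the Claim_ definition above) =====
theorem hessian_diagonal_spec : Claim_equal_hessian_diagonal := by
  intro clauses n a _hdom hpre
  obtain ⟨hn, hvars, halias⟩ := hpre
  simp only [Spec_hessian_diagonal, hessian_diagonal, hessian_diagonal_alt]
  rw [PySem.List.foldl_append_singleton_eq_map]
  simp only [List.nil_append]
  refine List.map_congr_left ?_
  intro i hi
  obtain ⟨h0i, hin⟩ := (PySem.List.mem_pyRange_one).mp hi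
  have hiL : i < (a.length : Int) := by omega
  have hkL : i.toNat < a.length := by omega
  have hrepl : (List.replicate a.length (0 : Int)).length = a.length := List.length_replicate
  rw [PySem.List.pyGetD_of_nonneg _ 0 h0i]
  rw [(pvDelta_getD clauses a i.toNat hvars halias _ hrepl).2]
  rw [List.getD_replicate 0 (by omega), zero_add]
  rw [PySem.List.pySetD_of_nonneg a _ h0i, PySem.List.pyGetD_of_nonneg a _ h0i]
  unfold pvEnergyA
  rw [pvEvalSat_eq_sum, pvEvalSat_eq_sum]
  have halg : ∀ Sf Sa z : Int, (z - Sf) - (z - Sa) = Sa - Sf := fun _ _ _ => by ring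
  rw [halg, ← pvSum_map_sub]
  refine congrArg List.sum (List.map_congr_left ?_)
  intro c hc
  by_cases hm : i.toNat ∈ (PySem.List.dedup (c.map (fun l => l.1))).map (pvCell a.length)
  · rw [if_pos hm]; rfl
  · rw [if_neg hm]
    have hne : ∀ l ∈ c, pvCell a.length l.1 ≠ i.toNat := by
      intro l hl he
      exact hm (List.mem_map.mpr ⟨l.1,
        (PySem.List.mem_dedup _ _).mpr (List.mem_map.mpr ⟨l, hl, rfl⟩), he⟩)
    rw [pvSatB_set_untouched c a i.toNat _ hkL (hvars c hc) hne, sub_self]
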